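-- pv_equiv track=rewrite | github.com/weightan/some-numerical-experiments | dipphcheck.py | eval_eq_e
-- ===== SOURCE A (Python) =====
-- def eval_eq_e(e, n):
--     out = []
--     for x in range(n):
--         for y in range(n):
--             r = (x**2 + y**2 - e*x*y + x + y)
--             if r<0:
--                 r = r + (abs(r)//n)*(n +2)
--             r = r%n
--             if (y,x) not in out and r == 0:
--                 out.append((x,y))
--     return set(out)
-- ===== SOURCE B (Python) =====
-- def _hit(e, n, x, y):
--     r = x * x + y * y - e * x * y + x + y
--     if r < 0:
--         r = r + (abs(r) // n) * (n + 2)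
--     return r % n == 0
--
--
-- def eval_eq_e(e, n):
--     out = []
--     for x in range(n):
--         for y in range(x, n):
--             if _hit(e, n, x, y):
--                 out.append((x, y))
--     return set(out)
-- ===== Notes on version B (the rewrite author's own statement) =====
-- stated objective: faster
-- what changed: B iterates y from x upward (the quadratic is symmetric in x and y), so the list-membership scan '(y,x) not in out' disappears entirely; the per-pair residue test is unchanged.
import Mathlib
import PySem

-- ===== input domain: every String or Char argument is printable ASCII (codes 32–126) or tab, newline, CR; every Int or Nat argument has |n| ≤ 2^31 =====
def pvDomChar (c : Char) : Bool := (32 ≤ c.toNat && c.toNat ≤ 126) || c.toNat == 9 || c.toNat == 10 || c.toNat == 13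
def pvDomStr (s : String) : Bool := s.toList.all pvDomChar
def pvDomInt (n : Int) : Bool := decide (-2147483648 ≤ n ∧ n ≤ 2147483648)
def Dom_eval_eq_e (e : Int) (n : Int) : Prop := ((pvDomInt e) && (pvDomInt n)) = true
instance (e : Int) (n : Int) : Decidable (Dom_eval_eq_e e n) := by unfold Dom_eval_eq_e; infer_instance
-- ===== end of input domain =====

-- B replaces A's "(y,x) not in out" list-membership scan by iterating y from x upward (the quadratic is symmetric in x,y), dropping the inner scan.

-- ===== PORT A =====
def eval_eq_e (e : Int) (n : Int) : List (Int × Int) :=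
  PySem.Set.ofList <|
    (PySem.List.pyRange 0 n 1).foldl (fun out x =>
      (PySem.List.pyRange 0 n 1).foldl (fun out y =>
        let r := x ^ 2 + y ^ 2 - e * x * y + x + y
        let r := if r < 0 then r + PySem.Int.floordiv |r| n * (n + 2) else r
        let r := PySem.Int.mod r n
        if (y, x) ∉ out ∧ r = 0 then out ++ [(x, y)] else out) out) []

-- ===== PORT B =====
-- helper _hit of Source B
def pyHit (e : Int) (n : Int) (x : Int) (y : Int) : Bool :=
  let r := x * x + y * y - e * x * y + x + y
  let r := if r < 0 then r + PySem.Int.floordiv |r| n * (n + 2) else r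
  PySem.Int.mod r n == 0

def eval_eq_e_alt (e : Int) (n : Int) : List (Int × Int) :=
  PySem.Set.ofList <|
    (PySem.List.pyRange 0 n 1).foldl (fun out x =>
      (PySem.List.pyRange x n 1).foldl (fun out y =>
        if pyHit e n x y then out ++ [(x, y)] else out) out) []

-- ===== PRECONDITION & SPEC =====
def Spec_eval_eq_e (e : Int) (n : Int) (out : List (Int × Int)) : Prop := out = eval_eq_e_alt e n
instance (e : Int) (n : Int) (out : List (Int × Int)) : Decidable (Spec_eval_eq_e e n out) := by unfold Spec_eval_eq_e; infer_instance

-- ===== CLAIM (what is proved, stated in full; the proofs are below) =====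
def Claim_equal_eval_eq_e : Prop := ∀ (e : Int) (n : Int), Dom_eval_eq_e e n → Spec_eval_eq_e e n (eval_eq_e e n)

-- ===== LEMMAS AND PROOFS =====

-- the pairs (x, y) produced for outer value x, for inner y ∈ [x, b)
def hitRow (e n x b : Int) : List (Int × Int) :=
  ((PySem.List.pyRange x b 1).filter (pyHit e n x)).map (fun y => (x, y))

-- B's list before dedup, outer values in [0, k)
def hitTbl (e n k : Int) : List (Int × Int) :=
  (PySem.List.pyRange 0 k 1).flatMap (fun x => hitRow e n x n)

-- A's inner-loop body, named for the proofs (definitionally the lambda in eval_eq_e)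
def Astep (e n x : Int) (out : List (Int × Int)) (y : Int) : List (Int × Int) :=
  let r := x ^ 2 + y ^ 2 - e * x * y + x + y
  let r := if r < 0 then r + PySem.Int.floordiv |r| n * (n + 2) else r
  let r := PySem.Int.mod r n
  if (y, x) ∉ out ∧ r = 0 then out ++ [(x, y)] else out

theorem eval_eq_e_def (e n : Int) : eval_eq_e e n =
    PySem.Set.ofList ((PySem.List.pyRange 0 n 1).foldl
      (fun out x => (PySem.List.pyRange 0 n 1).foldl (Astep e n x) out) []) := rfl

theorem pyHit_symm (e n x y : Int) : pyHit e n x y = pyHit e n y x := by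
  have h : x * x + y * y - e * x * y + x + y = y * y + x * x - e * y * x + y + x := by ring
  simp only [pyHit, h]

theorem A_cond (e n x y : Int) :
    (PySem.Int.mod (if x ^ 2 + y ^ 2 - e * x * y + x + y < 0 then
        x ^ 2 + y ^ 2 - e * x * y + x + y +
          PySem.Int.floordiv |x ^ 2 + y ^ 2 - e * x * y + x + y| n * (n + 2)
      else x ^ 2 + y ^ 2 - e * x * y + x + y) n = 0) ↔ pyHit e n x y = true := by
  have h : x ^ 2 + y ^ 2 - e * x * y + x + y = x * x + y * y - e * x * y + x + y := by ring
  simp only [pyHit, h, beq_iff_eq]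

theorem Astep_eq (e n x : Int) (out : List (Int × Int)) (y : Int) :
    Astep e n x out y =
      if (y, x) ∉ out ∧ pyHit e n x y = true then out ++ [(x, y)] else out := by
  simp only [Astep]
  exact if_congr (and_congr Iff.rfl (A_cond e n x y)) rfl rfl

theorem mem_hitRow {e n x b : Int} {p : Int × Int} :
    p ∈ hitRow e n x b ↔ p.1 = x ∧ x ≤ p.2 ∧ p.2 < b ∧ pyHit e n x p.2 = true := by
  obtain ⟨u, v⟩ := p
  simp only [hitRow, List.mem_map, List.mem_filter, PySem.List.mem_pyRange_one, Prod.mk.injEq]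
  constructor
  · rintro ⟨y, ⟨⟨h1, h2⟩, hh⟩, rfl, rfl⟩; exact ⟨rfl, h1, h2, hh⟩
  · rintro ⟨rfl, h1, h2, hh⟩; exact ⟨v, ⟨⟨h1, h2⟩, hh⟩, rfl, rfl⟩

theorem mem_hitTbl {e n k : Int} {p : Int × Int} :
    p ∈ hitTbl e n k ↔ 0 ≤ p.1 ∧ p.1 < k ∧ p.1 ≤ p.2 ∧ p.2 < n ∧ pyHit e n p.1 p.2 = true := by
  simp only [hitTbl, List.mem_flatMap, PySem.List.mem_pyRange_one]
  constructor
  · rintro ⟨x, ⟨hx0, hxk⟩, hm⟩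
    obtain ⟨rfl, h⟩ := mem_hitRow.mp hm
    exact ⟨hx0, hxk, h⟩
  · rintro ⟨h0, hk, h⟩
    exact ⟨p.1, ⟨h0, hk⟩, mem_hitRow.mpr ⟨rfl, h⟩⟩

theorem foldl_fixed {α β : Type} (f : β → α → β) (c : β) :
    ∀ l : List α, (∀ y ∈ l, f c y = c) → l.foldl f c = c := by
  intro l
  induction l with
  | nil => intro _; rfl
  | cons a t ih =>
    intro h
    rw [List.foldl_cons, h a (List.mem_cons_self ..)]
    exact ih fun y hy => h y (List.mem_cons_of_mem a hy)

-- the first half of A's inner loop (y < x) never appends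
theorem A_inner_lo (e n x : Int) (hxn : x < n) :
    (PySem.List.pyRange 0 x 1).foldl (Astep e n x) (hitTbl e n x) = hitTbl e n x := by
  apply foldl_fixed
  intro y hy
  rw [PySem.List.mem_pyRange_one] at hy
  rw [Astep_eq, if_neg]
  rintro ⟨hnm, hh⟩
  exact hnm (mem_hitTbl.mpr ⟨hy.1, hy.2, le_of_lt hy.2, hxn,
    (pyHit_symm e n y x ▸ hh)⟩)

theorem hitRow_self (e n x : Int) : hitRow e n x x = [] := by
  simp [hitRow, PySem.List.pyRange_one_eq_nil le_rfl]

theorem hitRow_succ (e n x m : Int) (hxm : x ≤ m) :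
    hitRow e n x (m + 1) =
      hitRow e n x m ++ (if pyHit e n x m then [(x, m)] else []) := by
  rw [hitRow, PySem.List.pyRange_one_succ_right hxm, List.filter_append, List.map_append]
  by_cases h : pyHit e n x m <;> simp [hitRow, h]

-- the second half of A's inner loop (y ≥ x) appends exactly row x
theorem A_inner_hi (e n x : Int) (_hx : 0 ≤ x) :
    ∀ (k : Nat) (m : Int), x ≤ m → m ≤ n → (n - m).toNat = k →
      (PySem.List.pyRange m n 1).foldl (Astep e n x) (hitTbl e n x ++ hitRow e n x m) =
        hitTbl e n x ++ hitRow e n x n := by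
  intro k
  induction k with
  | zero =>
    intro m hxm hmn hk
    have : m = n := by omega
    subst this
    rw [PySem.List.pyRange_one_eq_nil le_rfl, List.foldl_nil]
  | succ k ih =>
    intro m hxm hmn hk
    have hlt : m < n := by omega
    rw [PySem.List.pyRange_one_cons hlt, List.foldl_cons]
    have hnotmem : (m, x) ∉ hitTbl e n x ++ hitRow e n x m := by
      intro hmem
      rcases List.mem_append.mp hmem with h | h
      · have := (mem_hitTbl.mp h).2.1; omega
      · obtain ⟨h1, h2, h3, _⟩ := mem_hitRow.mp h
        simp at h1 h2 h3; omega
    rw [Astep_eq]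
    by_cases hh : pyHit e n x m = true
    · rw [if_pos ⟨hnotmem, hh⟩]
      have heq : hitTbl e n x ++ hitRow e n x m ++ [(x, m)] =
          hitTbl e n x ++ hitRow e n x (m + 1) := by
        rw [hitRow_succ e n x m hxm, if_pos hh, List.append_assoc]
      rw [heq]
      exact ih (m + 1) (by omega) (by omega) (by omega)
    · rw [if_neg (by rintro ⟨_, h⟩; exact hh h)]
      rw [show hitRow e n x m = hitRow e n x (m + 1) from by
        rw [hitRow_succ e n x m hxm, if_neg hh, List.append_nil]]
      exact ih (m + 1) (by omega) (by omega) (by omega)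

theorem hitTbl_clip (e n k : Int) (_hk0 : 0 ≤ k) (hk : n ≤ k) : hitTbl e n k = hitTbl e n n := by
  rcases le_total n 0 with hn | hn
  · rw [hitTbl, hitTbl, PySem.List.pyRange_one_eq_nil hn]
    simp only [List.flatMap_nil]
    apply List.flatMap_eq_nil_iff.mpr
    intro x hx
    rw [PySem.List.mem_pyRange_one] at hx
    simp [hitRow, PySem.List.pyRange_one_eq_nil (by omega : n ≤ x)]
  · rw [hitTbl, hitTbl, PySem.List.pyRange_one_append 0 n k hn hk, List.flatMap_append]
    have h2 : ((PySem.List.pyRange n k 1).flatMap fun x => hitRow e n x n) = [] := by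
      apply List.flatMap_eq_nil_iff.mpr
      intro x hx
      rw [PySem.List.mem_pyRange_one] at hx
      simp [hitRow, PySem.List.pyRange_one_eq_nil (by omega : n ≤ x)]
    rw [h2, List.append_nil]

theorem hitTbl_succ (e n k : Int) (hk : 0 ≤ k) :
    hitTbl e n (k + 1) = hitTbl e n k ++ hitRow e n k n := by
  rw [hitTbl, hitTbl, PySem.List.pyRange_one_succ_right hk, List.flatMap_append]
  simp

theorem A_outer (e n : Int) :
    ∀ (j : Nat) (k : Int), 0 ≤ k → (n - k).toNat = j →
      (PySem.List.pyRange k n 1).foldl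
        (fun out x => (PySem.List.pyRange 0 n 1).foldl (Astep e n x) out) (hitTbl e n k) =
      hitTbl e n n := by
  intro j
  induction j with
  | zero =>
    intro k hk0 hj
    have hnk : n ≤ k := by omega
    rw [PySem.List.pyRange_one_eq_nil hnk, List.foldl_nil]
    exact hitTbl_clip e n k hk0 hnk
  | succ j ih =>
    intro k hk0 hj
    have hkn : k < n := by omega
    have hstep : (PySem.List.pyRange 0 n 1).foldl (Astep e n k) (hitTbl e n k) =
        hitTbl e n (k + 1) := by
      rw [PySem.List.pyRange_one_append 0 k n hk0 (le_of_lt hkn), List.foldl_append,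
        A_inner_lo e n k hkn]
      have h2 := A_inner_hi e n k hk0 (n - k).toNat k le_rfl (le_of_lt hkn) rfl
      rw [hitRow_self, List.append_nil] at h2
      rw [h2, ← hitTbl_succ e n k hk0]
    rw [PySem.List.pyRange_one_cons hkn]
    simp only [List.foldl_cons]
    rw [hstep]
    exact ih (k + 1) (by omega) (by omega)

theorem eval_eq_e_eq (e n : Int) :
    eval_eq_e e n = PySem.Set.ofList (hitTbl e n n) := by
  rw [eval_eq_e_def]
  congr 1
  have h0 : hitTbl e n 0 = [] := by simp [hitTbl, PySem.List.pyRange_one_eq_nil le_rfl]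
  have := A_outer e n (n - 0).toNat 0 le_rfl rfl
  rw [h0] at this
  simpa using this

theorem eval_eq_e_alt_eq (e n : Int) :
    eval_eq_e_alt e n = PySem.Set.ofList (hitTbl e n n) := by
  rw [eval_eq_e_alt]
  congr 1
  have hinner : ∀ (x : Int) (out : List (Int × Int)),
      (PySem.List.pyRange x n 1).foldl
        (fun out y => if pyHit e n x y then out ++ [(x, y)] else out) out =
      out ++ hitRow e n x n := by
    intro x out
    simpa [hitRow] using
      PySem.List.foldl_append_if (pyHit e n x) (fun y => (x, y)) (PySem.List.pyRange x n 1) out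
  calc (PySem.List.pyRange 0 n 1).foldl (fun out x =>
          (PySem.List.pyRange x n 1).foldl
            (fun out y => if pyHit e n x y then out ++ [(x, y)] else out) out) []
      = (PySem.List.pyRange 0 n 1).foldl (fun out x => out ++ hitRow e n x n) [] := by
        apply PySem.List.foldl_congr_mem
        intro acc x _
        exact hinner x acc
    _ = hitTbl e n n := by
        rw [PySem.List.foldl_append_eq_flatMap]
        rfl

-- ===== VERDICT (by name: the statement is the Claim_ definition above) =====
theorem eval_eq_e_spec : Claim_equal_eval_eq_e := by
  intro e n _
  unfold Spec_eval_eq_e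
  rw [eval_eq_e_eq, eval_eq_e_alt_eq]
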